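-- pv_equiv track=rewrite | github.com/BrianPillmore/MuniRevenue | backend/app/security.py | _is_public_api_path
-- ===== SOURCE A (Python) =====
-- _PUBLIC_API_EXACT_PATHS = frozenset(
--     {
--         "/api/cities",
--         "/api/stats/overview",
--         "/api/stats/statewide-trend",
--         "/api/stats/rankings",
--         "/api/stats/naics-sectors",
--     }
-- )
--
-- def _is_public_api_path(path: str) -> bool:
--     if path in _PUBLIC_API_EXACT_PATHS:
--         return True
--
--     if path.startswith("/api/counties/") and path.endswith("/summary"):
--         return True
--
--     if not path.startswith("/api/cities/"):
--         return False
--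
--     parts = [segment for segment in path[len("/api/cities/"):].split("/") if segment]
--     if not parts:
--         return False
--     if len(parts) == 1:
--         return True
--     if len(parts) == 2 and parts[1] in {"ledger", "naics", "seasonality", "anomalies"}:
--         return parts[1] != "anomalies"
--     if len(parts) == 3 and parts[1] == "ledger" and parts[2] == "export":
--         return True
--     if len(parts) == 3 and parts[1] == "naics" and parts[2] == "top":
--         return True
--     if len(parts) == 4 and parts[1] == "naics" and parts[2] == "timeseries":
--         return True
--
--     return False
-- ===== SOURCE B (Python) =====
-- _PUBLIC_API_EXACT_PATHS = frozenset(
--     {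
--         "/api/cities",
--         "/api/stats/overview",
--         "/api/stats/statewide-trend",
--         "/api/stats/rankings",
--         "/api/stats/naics-sectors",
--     }
-- )
--
-- # Accepted /api/cities/ route shapes, with "*" as a wildcard segment.
-- # ("*", "anomalies") is deliberately absent: that route is not public.
-- _CITY_ROUTE_TEMPLATES = frozenset(
--     {
--         ("*",),
--         ("*", "ledger"),
--         ("*", "naics"),
--         ("*", "seasonality"),
--         ("*", "ledger", "export"),
--         ("*", "naics", "top"),
--         ("*", "naics", "timeseries", "*"),
--     }
-- )
--
--
-- def _is_public_api_path(path: str) -> bool: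
--     if path in _PUBLIC_API_EXACT_PATHS:
--         return True
--     if path.startswith("/api/counties/") and path.endswith("/summary"):
--         return True
--     if not path.startswith("/api/cities/"):
--         return False
--     parts = [segment for segment in path[len("/api/cities/"):].split("/") if segment]
--     if not parts:
--         return False
--     template = ["*"] + parts[1:]
--     if len(template) == 4:
--         template[3] = "*"
--     return tuple(template) in _CITY_ROUTE_TEMPLATES
-- ===== Notes on version B (the rewrite author's own statement) =====
-- stated objective: idiomatic
-- what changed: Replaces A's chain of length/segment if-branches for /api/cities/ routes by normalising the path segments into a wildcard route template ('*' for the city id and the trailing timeseries id) and looking it up in a frozenset of accepted templates.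
import Mathlib
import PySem

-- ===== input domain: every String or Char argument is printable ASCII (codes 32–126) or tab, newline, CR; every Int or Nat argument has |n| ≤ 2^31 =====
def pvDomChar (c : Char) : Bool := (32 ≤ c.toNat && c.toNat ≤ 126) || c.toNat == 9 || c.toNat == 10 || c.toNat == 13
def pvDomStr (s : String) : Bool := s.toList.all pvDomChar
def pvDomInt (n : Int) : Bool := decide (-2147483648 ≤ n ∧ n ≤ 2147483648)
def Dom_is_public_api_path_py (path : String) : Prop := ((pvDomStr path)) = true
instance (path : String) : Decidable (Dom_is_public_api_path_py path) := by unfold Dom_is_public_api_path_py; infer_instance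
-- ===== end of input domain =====

-- B replaces A's chain of length/segment if-branches by a lookup of the route shape
-- (city id and trailing id replaced by a "*" wildcard) in a template set: more idiomatic.

-- ===== PORT A =====
def pvExactPaths : List String :=
  ["/api/cities", "/api/stats/overview", "/api/stats/statewide-trend",
   "/api/stats/rankings", "/api/stats/naics-sectors"]

def is_public_api_path_py (path : String) : Bool :=
  if pvExactPaths.contains path then true
  else if PySem.Str.startswith path "/api/counties/" && PySem.Str.endswith path "/summary" then true
  else if !(PySem.Str.startswith path "/api/cities/") then false
  else
    let parts := ((PySem.Str.split? (PySem.Str.slice path (some 12) none) "/").getD []).filter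
      (fun seg => !(seg == ""))
    if parts == [] then false
    else if parts.length == 1 then true
    else if parts.length == 2 &&
        (["ledger", "naics", "seasonality", "anomalies"].contains (parts.getD 1 "")) then
      -- parts[1] is guarded by the length test, so List.getD is exact here
      !(parts.getD 1 "" == "anomalies")
    else if parts.length == 3 && parts.getD 1 "" == "ledger" && parts.getD 2 "" == "export" then true
    else if parts.length == 3 && parts.getD 1 "" == "naics" && parts.getD 2 "" == "top" then true
    else if parts.length == 4 && parts.getD 1 "" == "naics" && parts.getD 2 "" == "timeseries" then true
    else false

-- ===== PORT B =====
def pvCityTemplates : List (List String) :=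
  [["*"], ["*", "ledger"], ["*", "naics"], ["*", "seasonality"],
   ["*", "ledger", "export"], ["*", "naics", "top"], ["*", "naics", "timeseries", "*"]]

def is_public_api_path_py_alt (path : String) : Bool :=
  if pvExactPaths.contains path then true
  else if PySem.Str.startswith path "/api/counties/" && PySem.Str.endswith path "/summary" then true
  else if !(PySem.Str.startswith path "/api/cities/") then false
  else
    let parts := ((PySem.Str.split? (PySem.Str.slice path (some 12) none) "/").getD []).filter
      (fun seg => !(seg == ""))
    if parts == [] then false
    else
      let template := "*" :: PySem.List.slice parts (some 1) none
      let template := if template.length == 4 then template.set 3 "*" else template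
      pvCityTemplates.contains template

-- ===== PRECONDITION & SPEC =====
def Spec_is_public_api_path_py (path : String) (out : Bool) : Prop := out = is_public_api_path_py_alt path
instance (path : String) (out : Bool) : Decidable (Spec_is_public_api_path_py path out) := by unfold Spec_is_public_api_path_py; infer_instance

-- ===== CLAIM (what is proved, stated in full; the proofs are below) =====
def Claim_equal_is_public_api_path_py : Prop := ∀ (path : String), Dom_is_public_api_path_py path → Spec_is_public_api_path_py path (is_public_api_path_py path)

-- ===== LEMMAS AND PROOFS =====

-- the two tails agree on any segment list
set_option maxRecDepth 8000 in
theorem pv_tail_eq (ps : List String) :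
    (if ps == [] then false
     else if ps.length == 1 then true
     else if ps.length == 2 &&
         (["ledger", "naics", "seasonality", "anomalies"].contains (ps.getD 1 "")) then
       !(ps.getD 1 "" == "anomalies")
     else if ps.length == 3 && ps.getD 1 "" == "ledger" && ps.getD 2 "" == "export" then true
     else if ps.length == 3 && ps.getD 1 "" == "naics" && ps.getD 2 "" == "top" then true
     else if ps.length == 4 && ps.getD 1 "" == "naics" && ps.getD 2 "" == "timeseries" then true
     else false)
    =
    (if ps == [] then false
     else
       let template := "*" :: PySem.List.slice ps (some 1) none
       let template := if template.length == 4 then template.set 3 "*" else template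
       pvCityTemplates.contains template) := by
  match ps with
  | [] => rfl
  | [a] => simp [pvCityTemplates, PySem.List.slice_from_one]
  | [a, b] =>
    by_cases h1 : b = "ledger" <;> by_cases h2 : b = "naics" <;>
      by_cases h3 : b = "seasonality" <;> by_cases h4 : b = "anomalies" <;>
      simp_all [pvCityTemplates, PySem.List.slice_from_one]
  | [a, b, c] =>
    by_cases h1 : b = "ledger" <;> by_cases h2 : b = "naics" <;>
      by_cases h3 : c = "export" <;> by_cases h4 : c = "top" <;>
      simp_all [pvCityTemplates, PySem.List.slice_from_one]
  | [a, b, c, d] =>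
    by_cases h1 : b = "naics" <;> by_cases h2 : c = "timeseries" <;>
      simp_all [pvCityTemplates, PySem.List.slice_from_one, List.set]
  | a :: b :: c :: d :: e :: rest =>
    simp [pvCityTemplates, PySem.List.slice_from_one]

-- ===== VERDICT (by name: the statement is the Claim_ definition above) =====
theorem is_public_api_path_py_spec : Claim_equal_is_public_api_path_py := by
  intro path _
  unfold Spec_is_public_api_path_py is_public_api_path_py is_public_api_path_py_alt
  by_cases h1 : pvExactPaths.contains path = true
  · simp only [h1, if_true]
  · simp only [h1, if_false, Bool.false_eq_true]
    by_cases h2 : (PySem.Str.startswith path "/api/counties/" && PySem.Str.endswith path "/summary") = true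
    · simp only [h2, if_true]
    · simp only [h2, if_false, Bool.false_eq_true]
      by_cases h3 : PySem.Str.startswith path "/api/cities/" = true
      · simp only [h3, Bool.not_true, if_false, Bool.false_eq_true]
        exact pv_tail_eq _
      · simp only [eq_false_of_ne_true h3, Bool.not_false, if_true]
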